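-- pv_equiv track=rewrite | github.com/daftpunk31/3rd_sem_summer_hw | python_NBP_IT_187.py | find_sum43
-- ===== SOURCE A (Python) =====
-- def factors(a):
-- 	factors=[]
-- 	for i in range(1,a+1):
-- 		if a%i==0:
-- 			factors.append(i)
-- 		else:
-- 			pass
-- 	return factors
--
-- def find_sum43(prod, sqr):
-- 	factors_prod=factors(prod)
-- 	sumij=0
-- 	for i in factors_prod:
-- 		for j in factors_prod:
-- 			if (i*j==prod) and ((i**2)+(j**2)==sqr):
-- 				sumij=i+j
-- 	return sumij
-- ===== SOURCE B (Python) =====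
-- def find_sum43(prod, sqr):
--     # Enumerate divisors i up to sqrt(prod); pair i with prod//i and test the
--     # square-sum condition once.  For any valid pair, i+j is determined by
--     # (i+j)^2 = sqr + 2*prod, so the first hit equals A's last hit.
--     i = 1
--     while i * i <= prod:
--         if prod % i == 0:
--             j = prod // i
--             if i * i + j * j == sqr:
--                 return i + j
--         i += 1
--     return 0
-- ===== Notes on version B (the rewrite author's own statement) =====
-- stated objective: faster
-- what changed: Replaces the full divisor list plus quadratic nested scan with a single loop over i up to sqrt(prod) pairing i with prod//i and returning at the first match (the sum is unique since (i+j)^2 = sqr + 2*prod).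
import Mathlib
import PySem

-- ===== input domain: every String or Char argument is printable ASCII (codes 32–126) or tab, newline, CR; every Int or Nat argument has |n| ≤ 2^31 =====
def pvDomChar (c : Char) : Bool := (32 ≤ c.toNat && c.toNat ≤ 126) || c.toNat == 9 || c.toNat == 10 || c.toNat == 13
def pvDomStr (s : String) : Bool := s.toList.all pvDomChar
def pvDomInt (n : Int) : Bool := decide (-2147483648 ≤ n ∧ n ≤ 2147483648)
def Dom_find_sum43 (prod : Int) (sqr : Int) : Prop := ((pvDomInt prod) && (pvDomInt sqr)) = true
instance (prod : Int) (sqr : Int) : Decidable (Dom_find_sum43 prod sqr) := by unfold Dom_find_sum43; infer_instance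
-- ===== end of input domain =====

-- B replaces A's full divisor list + quadratic nested scan by one loop over i up to
-- sqrt(prod) pairing i with prod//i, returning at the first match (objective: faster).

-- ===== PORT A =====
-- factors(a): collect i in range(1, a+1) with a % i == 0
def pyFactors (a : Int) : List Int :=
  (PySem.List.pyRange 1 (a + 1) 1).foldl
    (fun acc i => if PySem.Int.mod a i = 0 then acc ++ [i] else acc) []

-- nested for-loops over factors(prod); i**2 is ported as i*i (exact for exponent 2)
def find_sum43 (prod : Int) (sqr : Int) : Int :=
  let factors_prod := pyFactors prod
  factors_prod.foldl
    (fun sumij i =>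
      factors_prod.foldl
        (fun sumij j =>
          if i * j = prod ∧ i * i + j * j = sqr then i + j else sumij)
        sumij)
    0

-- ===== PORT B =====
-- the while-loop of Source B; the '1 ≤ i' conjunct only makes the recursion total
-- (the loop is entered at i = 1 and i only increases)
def altLoop (prod sqr i : Int) : Int :=
  if h : 1 ≤ i ∧ i * i ≤ prod then
    if PySem.Int.mod prod i = 0 ∧
        i * i + PySem.Int.floordiv prod i * PySem.Int.floordiv prod i = sqr then
      i + PySem.Int.floordiv prod i
    else
      altLoop prod sqr (i + 1)
  else 0
termination_by (prod + 1 - i).toNat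
decreasing_by
  have hi : i ≤ prod := le_trans (le_mul_of_one_le_left (by omega) h.1) h.2
  omega

def find_sum43_alt (prod : Int) (sqr : Int) : Int := altLoop prod sqr 1

-- ===== PRECONDITION & SPEC =====
def Spec_find_sum43 (prod : Int) (sqr : Int) (out : Int) : Prop := out = find_sum43_alt prod sqr
instance (prod : Int) (sqr : Int) (out : Int) : Decidable (Spec_find_sum43 prod sqr out) := by unfold Spec_find_sum43; infer_instance

-- ===== CLAIM (what is proved, stated in full; the proofs are below) =====
def Claim_equal_find_sum43 : Prop := ∀ (prod : Int) (sqr : Int), Dom_find_sum43 prod sqr → Spec_find_sum43 prod sqr (find_sum43 prod sqr)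

-- ===== LEMMAS AND PROOFS =====

-- a 'last match wins' fold where every match yields the same value v
theorem foldl_ite_eq {α : Type} (c : α → Prop) [DecidablePred c] (g : α → Int) (v : Int)
    (l : List α) (hv : ∀ x ∈ l, c x → g x = v) :
    ∀ s, l.foldl (fun s x => if c x then g x else s) s = if ∃ x ∈ l, c x then v else s := by
  induction l with
  | nil => intro s; simp
  | cons a l ih =>
    intro s
    have hv' : ∀ x ∈ l, c x → g x = v := fun x hx => hv x (List.mem_cons_of_mem _ hx)
    by_cases hca : c a
    · simp only [List.foldl_cons, if_pos hca, ih hv', hv a (List.mem_cons_self) hca]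
      simp [hca]
    · simp only [List.foldl_cons, if_neg hca, ih hv']
      simp [hca]

theorem mem_pyFactors (a x : Int) : x ∈ pyFactors a ↔ 1 ≤ x ∧ x ≤ a ∧ x ∣ a := by
  unfold pyFactors
  rw [PySem.List.foldl_append_ite_eq_filter]
  simp [List.mem_filter, PySem.List.mem_pyRange_one, PySem.Int.mod_eq_zero_iff_dvd]
  omega

-- the sum of a valid pair is determined: (i+j)^2 = sqr + 2*prod
theorem sum_unique {prod sqr i j i' j' : Int}
    (hi : 1 ≤ i) (hj : 1 ≤ j) (hi' : 1 ≤ i') (hj' : 1 ≤ j')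
    (hp : i * j = prod) (hp' : i' * j' = prod)
    (hs : i * i + j * j = sqr) (hs' : i' * i' + j' * j' = sqr) :
    i + j = i' + j' := by
  have h2 : (i + j - (i' + j')) * (i + j + (i' + j')) = 0 := by
    linear_combination hs - hs' + 2 * hp - 2 * hp'
  rcases mul_eq_zero.mp h2 with h | h
  · omega
  · omega

-- a valid pair exists
def HasPair (prod sqr : Int) : Prop :=
  ∃ i j : Int, 1 ≤ i ∧ 1 ≤ j ∧ i * j = prod ∧ i * i + j * j = sqr

-- B's loop test at k, under 1 ≤ k ∧ k*k ≤ prod, yields a valid pair (k, prod/k)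
theorem bcond_pair {prod sqr k : Int} (hk : 1 ≤ k) (hkk : k * k ≤ prod)
    (hb : PySem.Int.mod prod k = 0 ∧
      k * k + PySem.Int.floordiv prod k * PySem.Int.floordiv prod k = sqr) :
    1 ≤ PySem.Int.floordiv prod k ∧ k * PySem.Int.floordiv prod k = prod ∧
      k * k + PySem.Int.floordiv prod k * PySem.Int.floordiv prod k = sqr := by
  have hdvd : k ∣ prod := (PySem.Int.mod_eq_zero_iff_dvd prod k).mp hb.1
  have hpos : (0 : Int) < k := by omega
  have hfd : PySem.Int.floordiv prod k = prod / k := PySem.Int.floordiv_eq_ediv_of_pos hpos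
  have hmul : k * (prod / k) = prod := Int.mul_ediv_cancel' hdvd
  have hge : 1 ≤ prod / k := by
    rw [Int.le_ediv_iff_mul_le hpos]
    have : k * 1 ≤ k * k := by nlinarith
    omega
  exact ⟨by rw [hfd]; exact hge, by rw [hfd]; exact hmul, hb.2⟩

theorem altLoop_eq_zero (prod sqr : Int)
    (hno : ¬ HasPair prod sqr) :
    ∀ n i, (prod + 1 - i).toNat = n → altLoop prod sqr i = 0 := by
  intro n
  induction n with
  | zero =>
    intro i hn
    rw [altLoop]
    split
    · next h =>
      have : i ≤ prod := le_trans (le_mul_of_one_le_left (by omega) h.1) h.2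
      omega
    · rfl
  | succ n ih =>
    intro i hn
    rw [altLoop]
    split
    · next h =>
      split
      · next hb =>
        exact absurd ⟨i, _, h.1, (bcond_pair h.1 h.2 hb).1,
          (bcond_pair h.1 h.2 hb).2.1, (bcond_pair h.1 h.2 hb).2.2⟩ hno
      · next hb =>
        have : i ≤ prod := le_trans (le_mul_of_one_le_left (by omega) h.1) h.2
        exact ih (i + 1) (by omega)
    · rfl

theorem altLoop_eq_v (prod sqr v : Int)
    (hv : ∀ k, 1 ≤ k → k * k ≤ prod →
      PySem.Int.mod prod k = 0 ∧
        k * k + PySem.Int.floordiv prod k * PySem.Int.floordiv prod k = sqr →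
      k + PySem.Int.floordiv prod k = v) :
    ∀ n i, (prod + 1 - i).toNat = n → 1 ≤ i →
    (∃ k, i ≤ k ∧ k * k ≤ prod ∧ PySem.Int.mod prod k = 0 ∧
      k * k + PySem.Int.floordiv prod k * PySem.Int.floordiv prod k = sqr) →
    altLoop prod sqr i = v := by
  intro n
  induction n with
  | zero =>
    intro i hn hi ⟨k, hik, hkk, _⟩
    have hik2 : i * i ≤ prod := le_trans (by nlinarith) hkk
    have : i ≤ prod := by nlinarith
    omega
  | succ n ih =>
    intro i hn hi hex
    obtain ⟨k, hik, hkk, hbk⟩ := hex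
    have hik2 : i * i ≤ prod := le_trans (by nlinarith) hkk
    rw [altLoop]
    rw [dif_pos ⟨hi, hik2⟩]
    split
    · next hb => exact hv i hi hik2 hb
    · next hb =>
      have hki : k ≠ i := by rintro rfl; exact hb hbk
      have : i ≤ prod := by nlinarith
      exact ih (i + 1) (by omega) (by omega) ⟨k, by omega, hkk, hbk⟩

-- characterization of A's nested fold
theorem find_sum43_eq_ite (prod sqr v : Int)
    (hv : ∀ i ∈ pyFactors prod, ∀ j ∈ pyFactors prod,
      i * j = prod ∧ i * i + j * j = sqr → i + j = v) :
    find_sum43 prod sqr =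
      if ∃ i ∈ pyFactors prod, ∃ j ∈ pyFactors prod,
          i * j = prod ∧ i * i + j * j = sqr then v else 0 := by
  show (pyFactors prod).foldl
      (fun sumij i =>
        (pyFactors prod).foldl
          (fun sumij j => if i * j = prod ∧ i * i + j * j = sqr then i + j else sumij)
          sumij)
      0 = _
  have hinner : ∀ i ∈ pyFactors prod, ∀ s : Int,
      (pyFactors prod).foldl
        (fun sumij j => if i * j = prod ∧ i * i + j * j = sqr then i + j else sumij) s
      = if ∃ j ∈ pyFactors prod, i * j = prod ∧ i * i + j * j = sqr then v else s := by
    intro i hi s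
    exact foldl_ite_eq (fun j => i * j = prod ∧ i * i + j * j = sqr) (fun j => i + j) v
      (pyFactors prod) (fun j hj hc => hv i hi j hj hc) s
  have houter :
      (pyFactors prod).foldl
        (fun sumij i =>
          (pyFactors prod).foldl
            (fun sumij j => if i * j = prod ∧ i * i + j * j = sqr then i + j else sumij)
            sumij)
        0
      = (pyFactors prod).foldl
          (fun s i =>
            if ∃ j ∈ pyFactors prod, i * j = prod ∧ i * i + j * j = sqr then v else s)
          0 :=
    PySem.List.foldl_congr_mem' _ _ _ _ (fun i hi s => hinner i hi s)
  rw [houter]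
  exact foldl_ite_eq (fun i => ∃ j ∈ pyFactors prod, i * j = prod ∧ i * i + j * j = sqr)
    (fun _ => v) v (pyFactors prod) (fun _ _ _ => rfl) 0

-- ===== VERDICT (by name: the statement is the Claim_ definition above) =====
theorem find_sum43_spec : Claim_equal_find_sum43 := by
  intro prod sqr _
  unfold Spec_find_sum43 find_sum43_alt
  by_cases hp : HasPair prod sqr
  · obtain ⟨i₀, j₀, hi₀, hj₀, hprod, hsqr⟩ := hp
    set v : Int := i₀ + j₀ with hvdef
    -- every valid pair of A sums to v
    have hvA : ∀ i ∈ pyFactors prod, ∀ j ∈ pyFactors prod,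
        i * j = prod ∧ i * i + j * j = sqr → i + j = v := by
      intro i hi j hj ⟨h1, h2⟩
      exact sum_unique ((mem_pyFactors _ _).mp hi).1 ((mem_pyFactors _ _).mp hj).1
        hi₀ hj₀ h1 hprod h2 hsqr
    -- every hit of B's loop sums to v
    have hvB : ∀ k, 1 ≤ k → k * k ≤ prod →
        PySem.Int.mod prod k = 0 ∧
          k * k + PySem.Int.floordiv prod k * PySem.Int.floordiv prod k = sqr →
        k + PySem.Int.floordiv prod k = v := by
      intro k hk hkk hb
      obtain ⟨h1, h2, h3⟩ := bcond_pair hk hkk hb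
      exact sum_unique hk h1 hi₀ hj₀ h2 hprod h3 hsqr
    -- memberships of the witness pair in factors(prod)
    have hle : ∀ a b : Int, 1 ≤ a → 1 ≤ b → a * b = prod → a ∈ pyFactors prod := by
      intro a b ha hb hab
      refine (mem_pyFactors _ _).mpr ⟨ha, ?_, ⟨b, hab.symm⟩⟩
      nlinarith
    -- B's loop has a hit at min i₀ j₀
    have hB : ∃ k, (1:Int) ≤ k ∧ k * k ≤ prod ∧ PySem.Int.mod prod k = 0 ∧
        k * k + PySem.Int.floordiv prod k * PySem.Int.floordiv prod k = sqr := by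
      rcases le_total i₀ j₀ with hle' | hle'
      · refine ⟨i₀, hi₀, by nlinarith, ?_, ?_⟩
        · exact (PySem.Int.mod_eq_zero_iff_dvd prod i₀).mpr ⟨j₀, hprod.symm⟩
        · have : PySem.Int.floordiv prod i₀ = j₀ := by
            rw [PySem.Int.floordiv_eq_ediv_of_pos (by omega), ← hprod,
              Int.mul_ediv_cancel_left _ (by omega)]
          rw [this]; exact hsqr
      · refine ⟨j₀, hj₀, by nlinarith, ?_, ?_⟩
        · exact (PySem.Int.mod_eq_zero_iff_dvd prod j₀).mpr ⟨i₀, by rw [mul_comm]; exact hprod.symm⟩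
        · have : PySem.Int.floordiv prod j₀ = i₀ := by
            rw [PySem.Int.floordiv_eq_ediv_of_pos (by omega)]
            have : j₀ * i₀ = prod := by rw [mul_comm]; exact hprod
            rw [← this, Int.mul_ediv_cancel_left _ (by omega)]
          rw [this]; linarith [hsqr]
    rw [find_sum43_eq_ite prod sqr v hvA, if_pos]
    · rw [altLoop_eq_v prod sqr v hvB (prod + 1 - 1).toNat 1 rfl le_rfl hB]
    · exact ⟨i₀, hle i₀ j₀ hi₀ hj₀ hprod, j₀, hle j₀ i₀ hj₀ hi₀ (by rw [mul_comm]; exact hprod),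
        hprod, hsqr⟩
  · have hvA : ∀ i ∈ pyFactors prod, ∀ j ∈ pyFactors prod,
        i * j = prod ∧ i * i + j * j = sqr → i + j = 0 := by
      intro i hi j hj ⟨h1, h2⟩
      exact absurd ⟨i, j, ((mem_pyFactors _ _).mp hi).1,
        ((mem_pyFactors _ _).mp hj).1, h1, h2⟩ hp
    rw [find_sum43_eq_ite prod sqr 0 hvA]
    rw [altLoop_eq_zero prod sqr hp (prod + 1 - 1).toNat 1 rfl]
    split
    · rfl
    · rfl
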